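-- pv_equiv track=rewrite | github.com/miickii/chinese-sentence-learning-pipeline | src/zh_sentence_learning_pipeline/grammar/patterns.py | skeletonize_compressed
-- ===== SOURCE A (Python) =====
-- from typing import Iterable, List, Set, Tuple
--
-- def skeletonize_compressed(tokens: List[str], anchors: Set[str]) -> str:
--     """
--     Length-robust skeleton:
--     - keep anchors as-is
--     - collapse any run of non-anchor tokens into <SPAN>
--     """
--     out: List[str] = []
--     in_span = False
--
--     for t in tokens:
--         if t in anchors:
--             out.append(t)
--             in_span = False
--         else:
--             if not in_span:
--                 out.append("<SPAN>")
--                 in_span = True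
--
--     # trim leading/trailing <SPAN>
--     while out and out[0] == "<SPAN>":
--         out.pop(0)
--     while out and out[-1] == "<SPAN>":
--         out.pop()
--
--     return " ".join(out)
-- ===== SOURCE B (Python) =====
-- def skeletonize_compressed(tokens, anchors):
--     """Anchor-position skeleton: collect the (index, token) pairs of anchor
--     occurrences; if none, the result is empty; otherwise emit the anchors in
--     order, inserting a single <SPAN> between two consecutive anchor positions
--     that are more than one index apart.  Edge runs of non-anchors never appear,
--     so no trimming pass is needed."""
--     hits = [(i, t) for i, t in enumerate(tokens) if t in anchors]
--     if not hits:
--         return ""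
--     parts = [hits[0][1]]
--     for (i, _), (j, t) in zip(hits, hits[1:]):
--         if j - i > 1:
--             parts.append("<SPAN>")
--         parts.append(t)
--     return " ".join(parts)
-- ===== Notes on version B (the rewrite author's own statement) =====
-- stated objective: alternative
-- what changed: Instead of stream-collapsing non-anchor runs with a state flag and then trimming edge placeholders, B first collects the (index, token) pairs of anchor occurrences and reconstructs the skeleton from consecutive anchor positions, inserting <SPAN> only when two anchor indices are more than one apart, so no trimming pass exists.
-- outside the precondition, e.g. on skeletonize_compressed(['<SPAN>'], {'<SPAN>'}): A returns '', B returns '<SPAN>'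
import Mathlib
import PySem

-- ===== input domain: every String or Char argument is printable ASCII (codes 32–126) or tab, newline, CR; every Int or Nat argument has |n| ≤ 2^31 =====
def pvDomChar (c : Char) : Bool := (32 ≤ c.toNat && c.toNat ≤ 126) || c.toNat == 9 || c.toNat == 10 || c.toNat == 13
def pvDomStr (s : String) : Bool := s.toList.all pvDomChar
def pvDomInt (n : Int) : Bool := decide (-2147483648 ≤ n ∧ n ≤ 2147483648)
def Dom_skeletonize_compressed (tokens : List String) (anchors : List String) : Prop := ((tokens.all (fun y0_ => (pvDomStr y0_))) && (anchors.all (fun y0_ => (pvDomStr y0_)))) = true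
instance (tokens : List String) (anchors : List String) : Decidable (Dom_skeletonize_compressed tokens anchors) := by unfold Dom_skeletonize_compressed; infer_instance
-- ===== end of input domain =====

-- B rebuilds the skeleton from the (index, token) pairs of anchor occurrences,
-- inserting <SPAN> only between anchor positions more than one apart, instead of
-- A's state-flag run collapse followed by edge trimming (alternative decomposition).

-- ===== PORT A =====
-- the 'for t in tokens' loop over state (out, in_span)
def skelLoopA (anchors : List String) : List String → List String → Bool → List String
  | [], out, _ => out
  | t :: ts, out, in_span =>
    if anchors.contains t then skelLoopA anchors ts (out ++ [t]) false
    else if in_span then skelLoopA anchors ts out true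
    else skelLoopA anchors ts (out ++ ["<SPAN>"]) true

-- while out and out[0] == "<SPAN>": out.pop(0)
def skelTrimFrontA : List String → List String
  | [] => []
  | x :: xs => if x = "<SPAN>" then skelTrimFrontA xs else x :: xs

-- while out and out[-1] == "<SPAN>": out.pop()
def skelTrimBackA (l : List String) : List String :=
  match h : l.getLast? with
  | none => l
  | some x =>
    if x = "<SPAN>" then skelTrimBackA l.dropLast else l
termination_by l.length
decreasing_by
  have hne : l ≠ [] := by intro e; subst e; simp at h
  have : 0 < l.length := List.length_pos_of_ne_nil hne
  simp [List.length_dropLast]; omega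

def skeletonize_compressed (tokens : List String) (anchors : List String) : String :=
  PySem.Str.join " " (skelTrimBackA (skelTrimFrontA (skelLoopA anchors tokens [] false)))

-- ===== PORT B =====
-- hits = [(i, t) for i, t in enumerate(tokens) if t in anchors]; then parts is
-- built by the 'for … in zip(hits, hits[1:])' loop starting from [hits[0][1]]
def skeletonize_compressed_alt (tokens : List String) (anchors : List String) : String :=
  let hits := (PySem.List.enumerate tokens).filter (fun p => anchors.contains p.2)
  match hits with
  | [] => ""
  | h0 :: rest =>
    let parts := ((h0 :: rest).zip rest).foldl
      (fun acc pq => acc ++ (if pq.2.1 - pq.1.1 > 1 then ["<SPAN>", pq.2.2] else [pq.2.2]))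
      [h0.2]
    PySem.Str.join " " parts

-- ===== PRECONDITION & SPEC =====
-- Pre_ excludes the sentinel collision where the literal token "<SPAN>" is itself an
-- anchor and occurs among the tokens: there A's edge-trimming may delete a real kept
-- token (both behaviours are defensible, no caller would specify either).
def Pre_skeletonize_compressed (tokens : List String) (anchors : List String) : Prop :=
  ¬("<SPAN>" ∈ tokens ∧ "<SPAN>" ∈ anchors)
instance (tokens : List String) (anchors : List String) : Decidable (Pre_skeletonize_compressed tokens anchors) := by unfold Pre_skeletonize_compressed; infer_instance

def pvWitness_skeletonize_compressed : List String × List String := (["x", "a", "y", "b"], ["a", "b"])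

def Spec_skeletonize_compressed (tokens : List String) (anchors : List String) (out : String) : Prop := out = skeletonize_compressed_alt tokens anchors
instance (tokens : List String) (anchors : List String) (out : String) : Decidable (Spec_skeletonize_compressed tokens anchors out) := by unfold Spec_skeletonize_compressed; infer_instance

-- ===== CLAIM (what is proved, stated in full; the proofs are below) =====
def Claim_equal_skeletonize_compressed : Prop := ∀ (tokens : List String) (anchors : List String), Dom_skeletonize_compressed tokens anchors → Pre_skeletonize_compressed tokens anchors → Spec_skeletonize_compressed tokens anchors (skeletonize_compressed tokens anchors)

-- ===== LEMMAS AND PROOFS =====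

-- shared intermediate: the skeleton pieces after the first anchor ('g' = gap pending)
def tailB (key : String → Bool) : List String → Bool → List String
  | [], _ => []
  | t :: ts, g =>
    if key t then (if g then ["<SPAN>", t] else [t]) ++ tailB key ts false
    else tailB key ts true

-- shared intermediate: the whole trimmed skeleton piece list
def cFront (key : String → Bool) : List String → List String
  | [] => []
  | t :: ts => if key t then t :: tailB key ts false else cFront key ts

-- reference form of A's collapsed (untrimmed) token list
def skelRef (key : String → Bool) : List String → Bool → List String
  | [], _ => []
  | t :: ts, sp =>
    if key t then t :: skelRef key ts false
    else if sp then skelRef key ts true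
    else "<SPAN>" :: skelRef key ts true

theorem skelLoopA_eq_ref (anchors : List String) (ts : List String) :
    ∀ (out : List String) (sp : Bool),
      skelLoopA anchors ts out sp = out ++ skelRef (fun t => anchors.contains t) ts sp := by
  induction ts with
  | nil => intro out sp; simp [skelLoopA, skelRef]
  | cons t ts ih =>
    intro out sp
    by_cases h : t ∈ anchors
    · simp [skelLoopA, skelRef, h, ih]
    · cases sp <;> simp [skelLoopA, skelRef, h, ih]

theorem trimBack_eq (l : List String) :
    skelTrimBackA l = (l.reverse.dropWhile (fun t => t == "<SPAN>")).reverse := by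
  induction l using List.reverseRecOn with
  | nil => rw [skelTrimBackA]; simp
  | append_singleton ys y ih =>
    rw [skelTrimBackA]
    split
    · next heq => simp at heq
    · next x heq =>
      rw [List.getLast?_concat] at heq
      cases Option.some.inj heq
      by_cases h : y = "<SPAN>"
      · simp [h, ih]
      · simp [h]

theorem trimBack_middle (l1 l2 : List String) (t : String) (h : t ≠ "<SPAN>") :
    skelTrimBackA (l1 ++ t :: l2) = l1 ++ t :: skelTrimBackA l2 := by
  rw [trimBack_eq, trimBack_eq]
  have hrev : (l1 ++ t :: l2).reverse = l2.reverse ++ t :: l1.reverse := by simp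
  rw [hrev, List.dropWhile_append]
  split_ifs with he
  · rw [List.isEmpty_iff] at he
    simp [h, he]
  · simp [h]

-- A after trimming the back = tailB (span emitted eagerly by A, lazily by tailB)
theorem lemR (anchors : List String) (ts : List String) :
    ∀ (g : Bool), (∀ t ∈ ts, anchors.contains t = true → t ≠ "<SPAN>") →
      skelTrimBackA ((if g then ["<SPAN>"] else []) ++ skelRef (fun t => anchors.contains t) ts g)
        = tailB (fun t => anchors.contains t) ts g := by
  induction ts with
  | nil =>
    intro g _
    cases g <;> simp [skelRef, tailB, trimBack_eq]
  | cons t ts ih =>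
    intro g hP
    have hPt : ∀ u ∈ ts, anchors.contains u = true → u ≠ "<SPAN>" := by
      intro u hu; exact hP u (List.mem_cons_of_mem _ hu)
    by_cases hm : t ∈ anchors
    · have hk : anchors.contains t = true := by simpa using hm
      have hts : t ≠ "<SPAN>" := hP t (List.mem_cons_self) hk
      have h1 : (if g then ["<SPAN>"] else []) ++ skelRef (fun t => anchors.contains t) (t :: ts) g
          = (if g then ["<SPAN>"] else []) ++ t :: skelRef (fun t => anchors.contains t) ts false := by
        simp [skelRef, hm]
      rw [h1, trimBack_middle _ _ _ hts]
      have h2 := ih false hPt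
      simp only [if_neg Bool.false_ne_true, List.nil_append] at h2
      rw [h2]
      cases g <;> simp [tailB, hm]
    · have h1 : (if g then ["<SPAN>"] else []) ++ skelRef (fun t => anchors.contains t) (t :: ts) g
          = (if true then ["<SPAN>"] else []) ++ skelRef (fun t => anchors.contains t) ts true := by
        cases g <;> simp [skelRef, hm]
      rw [h1, ih true hPt]
      simp [tailB, hm]

theorem trimFront_span (l : List String) :
    skelTrimFrontA ("<SPAN>" :: l) = skelTrimFrontA l := by
  simp [skelTrimFrontA]

theorem lemF (anchors : List String) (ts : List String) :
    skelTrimFrontA (skelRef (fun t => anchors.contains t) ts true)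
      = skelTrimFrontA (skelRef (fun t => anchors.contains t) ts false) := by
  cases ts with
  | nil => rfl
  | cons t ts =>
    by_cases hm : t ∈ anchors
    · simp [skelRef, hm]
    · simp [skelRef, hm, trimFront_span]

-- A's whole pipeline computes cFront
theorem lemA (anchors : List String) (ts : List String)
    (hP : ∀ t ∈ ts, anchors.contains t = true → t ≠ "<SPAN>") :
    skelTrimBackA (skelTrimFrontA (skelRef (fun t => anchors.contains t) ts false))
      = cFront (fun t => anchors.contains t) ts := by
  induction ts with
  | nil => simp [skelRef, cFront, skelTrimFrontA, trimBack_eq]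
  | cons t ts ih =>
    have hPt : ∀ u ∈ ts, anchors.contains u = true → u ≠ "<SPAN>" := by
      intro u hu; exact hP u (List.mem_cons_of_mem _ hu)
    by_cases hm : t ∈ anchors
    · have hk : anchors.contains t = true := by simpa using hm
      have hts : t ≠ "<SPAN>" := hP t (List.mem_cons_self) hk
      have h1 : skelTrimFrontA (skelRef (fun t => anchors.contains t) (t :: ts) false)
          = t :: skelRef (fun t => anchors.contains t) ts false := by
        simp [skelRef, hm, skelTrimFrontA, hts]
      rw [h1]
      have h2 := trimBack_middle [] (skelRef (fun t => anchors.contains t) ts false) t hts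
      simp only [List.nil_append] at h2
      rw [h2]
      have h3 := lemR anchors ts false hPt
      simp only [if_neg Bool.false_ne_true, List.nil_append] at h3
      rw [h3]
      simp [cFront, hm]
    · have h0 : skelRef (fun t => anchors.contains t) (t :: ts) false
          = "<SPAN>" :: skelRef (fun t => anchors.contains t) ts true := by
        simp [skelRef, hm]
      rw [h0, trimFront_span, lemF anchors ts, ih hPt]
      simp [cFront, hm]

-- B-side: recursive spine of the zip-adjacent-pairs fold
def chainB : Int → List (Int × String) → List String
  | _, [] => []
  | i, (j, t) :: rest => (if j - i > 1 then ["<SPAN>", t] else [t]) ++ chainB j rest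

theorem foldZip (rest : List (Int × String)) :
    ∀ (h0 : Int × String) (acc : List String),
      ((h0 :: rest).zip rest).foldl
        (fun (acc : List String) (pq : (Int × String) × (Int × String)) =>
          acc ++ (if pq.2.1 - pq.1.1 > 1 then ["<SPAN>", pq.2.2] else [pq.2.2])) acc
        = acc ++ chainB h0.1 rest := by
  induction rest with
  | nil => intro h0 acc; simp [chainB]
  | cons h1 rs ih =>
    intro h0 acc
    simp only [List.zip_cons_cons, List.foldl_cons, ih h1]
    obtain ⟨j, t⟩ := h1
    simp [chainB]

-- the anchor hits of the tokens starting at enumeration index n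
def hitsF (anchors : List String) (n : Int) (xs : List String) : List (Int × String) :=
  (PySem.List.enumerate xs n).filter (fun p => anchors.contains p.2)

theorem lemE3 (anchors : List String) (xs : List String) :
    ∀ (n i : Int), i + 1 ≤ n →
      chainB i (hitsF anchors n xs)
        = tailB (fun t => anchors.contains t) xs (decide (i + 1 < n)) := by
  induction xs with
  | nil => intro n i _; simp [hitsF, PySem.List.enumerate, chainB, tailB]
  | cons t ts ih =>
    intro n i hle
    by_cases hm : t ∈ anchors
    · have h1 : hitsF anchors n (t :: ts) = (n, t) :: hitsF anchors (n + 1) ts := by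
        simp [hitsF, PySem.List.enumerate_cons, hm]
      rw [h1]
      simp only [chainB]
      rw [ih (n + 1) n (by omega)]
      have hg : decide (n + 1 < n + 1) = false := by simp
      rw [hg]
      by_cases hc : i + 1 < n
      · have hgt : n - i > 1 := by omega
        simp [tailB, hm, hgt, hc]
      · have hgt : ¬(n - i > 1) := by omega
        simp [tailB, hm, hgt, hc]
    · have h1 : hitsF anchors n (t :: ts) = hitsF anchors (n + 1) ts := by
        simp [hitsF, PySem.List.enumerate_cons, hm]
      rw [h1, ih (n + 1) i (by omega)]
      have hd : decide (i + 1 < n + 1) = true := by simp; omega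
      rw [hd]
      simp [tailB, hm]

theorem lemE4 (anchors : List String) (xs : List String) :
    ∀ (n : Int),
      cFront (fun t => anchors.contains t) xs
        = (match hitsF anchors n xs with
           | [] => []
           | (p, t) :: rest => t :: chainB p rest) := by
  induction xs with
  | nil => intro n; simp [hitsF, PySem.List.enumerate, cFront]
  | cons t ts ih =>
    intro n
    by_cases hm : t ∈ anchors
    · have h1 : hitsF anchors n (t :: ts) = (n, t) :: hitsF anchors (n + 1) ts := by
        simp [hitsF, PySem.List.enumerate_cons, hm]
      rw [h1]
      have h2 := lemE3 anchors ts (n + 1) n (by omega)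
      have hg : decide (n + 1 < n + 1) = false := by simp
      rw [hg] at h2
      simp [cFront, hm, h2]
    · have h1 : hitsF anchors n (t :: ts) = hitsF anchors (n + 1) ts := by
        simp [hitsF, PySem.List.enumerate_cons, hm]
      rw [h1, ← ih (n + 1)]
      simp [cFront, hm]

theorem lemB (anchors : List String) (xs : List String) :
    skeletonize_compressed_alt xs anchors
      = PySem.Str.join " " (cFront (fun t => anchors.contains t) xs) := by
  unfold skeletonize_compressed_alt
  rw [lemE4 anchors xs 0]
  show (match hitsF anchors 0 xs with
        | [] => ""
        | h0 :: rest => PySem.Str.join " "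
            (((h0 :: rest).zip rest).foldl
              (fun (acc : List String) (pq : (Int × String) × (Int × String)) =>
                acc ++ (if pq.2.1 - pq.1.1 > 1 then ["<SPAN>", pq.2.2] else [pq.2.2]))
              [h0.2])) = _
  cases h : hitsF anchors 0 xs with
  | nil => rfl
  | cons h0 rest =>
    obtain ⟨p, t⟩ := h0
    show PySem.Str.join " "
        ((((p, t) :: rest).zip rest).foldl
          (fun (acc : List String) (pq : (Int × String) × (Int × String)) =>
            acc ++ (if pq.2.1 - pq.1.1 > 1 then ["<SPAN>", pq.2.2] else [pq.2.2])) [t])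
        = PySem.Str.join " " (t :: chainB p rest)
    rw [foldZip rest (p, t) [t]]
    rfl

-- ===== VERDICT (by name: the statement is the Claim_ definition above) =====
theorem skeletonize_compressed_spec : Claim_equal_skeletonize_compressed := by
  intro tokens anchors _ hpre
  unfold Spec_skeletonize_compressed skeletonize_compressed
  have hP : ∀ t ∈ tokens, anchors.contains t = true → t ≠ "<SPAN>" := by
    intro t ht hk he
    subst he
    exact hpre ⟨ht, by simpa using hk⟩
  rw [skelLoopA_eq_ref, List.nil_append, lemA anchors tokens hP, lemB]
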